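-- pv_equiv track=rewrite | github.com/kevindong/aoc2021 | day10/day10p2.py | filter_to_incomplete_leftover
-- ===== SOURCE A (Python) =====
-- def get_pairs():
--     return {"(": ")", "[": "]", "{": "}", "<": ">"}
--
-- def filter_to_incomplete_leftover(lines):
--     output = []
--     for line in lines:
--         stack = []
--         is_corrupt = False
--         for c in line:
--             if c in get_pairs().keys():
--                 stack.append(c)
--             elif c in get_pairs().values():
--                 if len(stack) == 0:
--                     is_corrupt = True
--                     break
--                 last = stack.pop()
--                 if get_pairs()[last] != c:
--                     is_corrupt = True
--                     break
--         if not is_corrupt and len(stack) != 0: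
--             output.append(stack)
--     return output
-- ===== SOURCE B (Python) =====
-- def filter_to_incomplete_leftover(lines):
--     pairs = {"(": ")", "[": "]", "{": "}", "<": ">"}
--     output = []
--     for line in lines:
--         s = [c for c in line if c in pairs.keys() or c in pairs.values()]
--         # repeatedly delete the first adjacent matched pair until none remains
--         while True:
--             found = False
--             for i in range(len(s) - 1):
--                 if s[i] in pairs.keys() and pairs[s[i]] == s[i + 1]:
--                     del s[i:i + 2]
--                     found = True
--                     break
--             if not found:
--                 break
--         # any closing bracket left means the line was corrupt
--         if s and not any(c in pairs.values() for c in s):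
--             output.append(s)
--     return output
-- ===== Notes on version B (the rewrite author's own statement) =====
-- stated objective: alternative
-- what changed: Replaces A's single-pass stack machine (push opens, pop-and-check on closes, early break on corruption) with bracket-filtering followed by repeated deletion of the first adjacent matched pair until a fixpoint: a leftover closing bracket means corrupt, otherwise the residue is exactly A's leftover stack.
import Mathlib
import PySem

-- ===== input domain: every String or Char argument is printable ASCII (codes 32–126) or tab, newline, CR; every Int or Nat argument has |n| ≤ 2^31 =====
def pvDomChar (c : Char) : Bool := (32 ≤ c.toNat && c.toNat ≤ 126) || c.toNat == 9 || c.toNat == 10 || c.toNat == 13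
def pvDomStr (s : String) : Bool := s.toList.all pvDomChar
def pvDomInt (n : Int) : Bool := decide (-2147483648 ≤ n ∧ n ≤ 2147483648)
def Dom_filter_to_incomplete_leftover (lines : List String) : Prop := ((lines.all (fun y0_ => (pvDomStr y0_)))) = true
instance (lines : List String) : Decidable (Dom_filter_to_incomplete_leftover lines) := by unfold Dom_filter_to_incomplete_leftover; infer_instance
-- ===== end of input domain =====

-- B replaces A's single-pass stack machine by bracket-filtering plus repeated cancellation of the
-- first adjacent matched pair; alternative decomposition (not faster), same return value everywhere.

-- the pairs dict of get_pairs() (shared by both Pythons)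
def pvGetPairs : List (Char × Char) := [('(', ')'), ('[', ']'), ('{', '}'), ('<', '>')]
-- c in get_pairs().keys()
def pvIsOpenC (c : Char) : Bool := (pvGetPairs.map Prod.fst).contains c
-- c in get_pairs().values()
def pvIsCloseC (c : Char) : Bool := (pvGetPairs.map Prod.snd).contains c
-- get_pairs()[c] (only applied to keys)
def pvPairOf (c : Char) : Char := (pvGetPairs.lookup c).getD ' '

-- ===== PORT A =====
-- A's inner loop: stack (append at end) + is_corrupt flag, early break on corruption
def pvLoopA (stack : List Char) (cs : List Char) : List Char × Bool :=
  match cs with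
  | [] => (stack, false)
  | c :: rest =>
    if pvIsOpenC c then pvLoopA (stack ++ [c]) rest
    else if pvIsCloseC c then
      match stack.getLast? with
      | none => (stack, true)                -- len(stack) == 0
      | some last =>
        let stack' := stack.dropLast        -- stack.pop()
        if pvPairOf last ≠ c then (stack', true)
        else pvLoopA stack' rest
    else pvLoopA stack rest

def filter_to_incomplete_leftover (lines : List String) : List (List String) :=
  lines.foldl (fun output line =>
    let p := pvLoopA [] line.toList
    if p.2 = false ∧ p.1 ≠ [] then output ++ [p.1.map (fun c => String.ofList [c])] else output) []

-- ===== PORT B =====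
-- B's inner scan: find the first adjacent matched pair and delete it
def pvStep? : List Char → Option (List Char)
  | [] => none
  | [_] => none
  | a :: b :: t =>
    if pvIsOpenC a ∧ pvPairOf a = b then some t
    else (pvStep? (b :: t)).map (a :: ·)

-- B's while-loop: repeat until no pair is found (each deletion removes 2 chars, so
-- s.length fuel always suffices; the Python loop terminates for the same reason)
def pvReduce : Nat → List Char → List Char
  | 0, s => s
  | n + 1, s =>
    match pvStep? s with
    | none => s
    | some s' => pvReduce n s'

def filter_to_incomplete_leftover_alt (lines : List String) : List (List String) :=
  lines.foldl (fun output line =>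
    let s := line.toList.filter (fun c => pvIsOpenC c || pvIsCloseC c)
    let r := pvReduce s.length s
    if r ≠ [] ∧ r.any pvIsCloseC = false then output ++ [r.map (fun c => String.ofList [c])] else output) []

-- ===== PRECONDITION & SPEC =====
def Spec_filter_to_incomplete_leftover (lines : List String) (out : List (List String)) : Prop := out = filter_to_incomplete_leftover_alt lines
instance (lines : List String) (out : List (List String)) : Decidable (Spec_filter_to_incomplete_leftover lines out) := by unfold Spec_filter_to_incomplete_leftover; infer_instance

-- ===== CLAIM (what is proved, stated in full; the proofs are below) =====
def Claim_equal_filter_to_incomplete_leftover : Prop := ∀ (lines : List String), Dom_filter_to_incomplete_leftover lines → Spec_filter_to_incomplete_leftover lines (filter_to_incomplete_leftover lines)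

-- ===== LEMMAS AND PROOFS =====

-- proof-side stack machine: head-top stack, none = corrupt
def pvStepM (st : Option (List Char)) (c : Char) : Option (List Char) :=
  match st with
  | none => none
  | some stk =>
    if pvIsOpenC c then some (c :: stk)
    else if pvIsCloseC c then
      match stk with
      | [] => none
      | t :: r => if pvPairOf t = c then some r else none
    else some stk

def pvRunM (st : Option (List Char)) (cs : List Char) : Option (List Char) := cs.foldl pvStepM st

theorem pvRunM_none (cs : List Char) : pvRunM none cs = none := by
  induction cs with
  | nil => rfl
  | cons c rest ih => simpa [pvRunM, pvStepM, List.foldl] using ih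

theorem pvOpen_not_close (c : Char) (h : pvIsOpenC c = true) : pvIsCloseC c = false := by
  simp [pvIsOpenC, pvGetPairs] at h
  rcases h with h | h | h | h <;> subst h <;> decide

theorem pvPairOf_not_open (c : Char) (h : pvIsOpenC c = true) : pvIsOpenC (pvPairOf c) = false := by
  simp [pvIsOpenC, pvGetPairs] at h
  rcases h with h | h | h | h <;> subst h <;> decide

theorem pvPairOf_close (c : Char) (h : pvIsOpenC c = true) : pvIsCloseC (pvPairOf c) = true := by
  simp [pvIsOpenC, pvGetPairs] at h
  rcases h with h | h | h | h <;> subst h <;> decide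

-- bridge: A's loop computes exactly the proof-side machine (stack reversed: head = top)
theorem pvBridgeA (cs : List Char) : ∀ stack : List Char,
    pvRunM (some stack.reverse) cs =
      (if (pvLoopA stack cs).2 then none else some (pvLoopA stack cs).1.reverse) := by
  induction cs with
  | nil => intro stack; simp [pvRunM, pvLoopA]
  | cons c rest ih =>
    intro stack
    by_cases ho : pvIsOpenC c = true
    · have : pvRunM (some stack.reverse) (c :: rest)
          = pvRunM (some (stack ++ [c]).reverse) rest := by
        simp [pvRunM, List.foldl, pvStepM, ho]
      rw [this, ih (stack ++ [c])]
      simp [pvLoopA, ho]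
    · by_cases hc : pvIsCloseC c = true
      · cases hst : stack.getLast? with
        | none =>
          have hs : stack = [] := List.getLast?_eq_none_iff.mp hst
          subst hs
          have hL : pvRunM (some ([] : List Char).reverse) (c :: rest) = none := by
            simp [pvRunM, List.foldl, pvStepM, ho, hc]
            exact pvRunM_none rest
          rw [hL]
          simp [pvLoopA, ho, hc]
        | some last =>
          obtain ⟨pre, rfl⟩ := List.getLast?_eq_some_iff.mp hst
          by_cases hm : pvPairOf last = c
          · have hL : pvRunM (some (pre ++ [last]).reverse) (c :: rest)
                = pvRunM (some pre.reverse) rest := by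
              simp [pvRunM, List.foldl, pvStepM, ho, hc, hm]
            rw [hL, ih pre]
            simp [pvLoopA, ho, hc, hm]
          · have hL : pvRunM (some (pre ++ [last]).reverse) (c :: rest) = none := by
              simp [pvRunM, List.foldl, pvStepM, ho, hc, hm]
              exact pvRunM_none rest
            rw [hL]
            simp [pvLoopA, ho, hc, hm]
      · have : pvRunM (some stack.reverse) (c :: rest)
            = pvRunM (some stack.reverse) rest := by
          simp [pvRunM, List.foldl, pvStepM, ho, hc]
        rw [this, ih stack]
        simp [pvLoopA, ho, hc]

-- skipping a non-bracket character leaves the machine state unchanged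
theorem pvFilter_run (cs : List Char) : ∀ st,
    pvRunM st cs = pvRunM st (cs.filter (fun c => pvIsOpenC c || pvIsCloseC c)) := by
  induction cs with
  | nil => intro st; rfl
  | cons c rest ih =>
    intro st
    by_cases hb : (pvIsOpenC c || pvIsCloseC c) = true
    · have : pvRunM st (c :: rest) = pvRunM (pvStepM st c) rest := rfl
      rw [this, ih]
      simp [pvRunM, hb]
    · have hno : pvIsOpenC c = false := by
        cases h : pvIsOpenC c <;> simp [h] at hb ⊢
      have hnc : pvIsCloseC c = false := by
        cases h : pvIsCloseC c <;> simp [h] at hb ⊢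
      have hsk : pvStepM st c = st := by
        cases st with
        | none => rfl
        | some stk => simp [pvStepM, hno, hnc]
      have : pvRunM st (c :: rest) = pvRunM (pvStepM st c) rest := rfl
      rw [this, hsk, ih]
      simp [hno, hnc]

-- removing an adjacent matched pair does not change the machine's final state
theorem pvStep_inv : ∀ (s s' : List Char), pvStep? s = some s' → ∀ st, pvRunM st s = pvRunM st s'
  | [], _, h => by simp [pvStep?] at h
  | [_], _, h => by simp [pvStep?] at h
  | a :: b :: t, s', h => by
    intro st
    by_cases hm : pvIsOpenC a ∧ pvPairOf a = b
    · obtain rfl : t = s' := by simpa [pvStep?, hm] using h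
      have hkey : pvStepM (pvStepM st a) b = st := by
        cases st with
        | none => rfl
        | some stk =>
          have hob : pvIsOpenC b = false := hm.2 ▸ pvPairOf_not_open a hm.1
          have hcb : pvIsCloseC b = true := hm.2 ▸ pvPairOf_close a hm.1
          simp [pvStepM, hm.1, hob, hcb, hm.2]
      show pvRunM (pvStepM (pvStepM st a) b) t = pvRunM st t
      rw [hkey]
    · have h2 : (pvStep? (b :: t)).map (a :: ·) = some s' := by simpa [pvStep?, hm] using h
      obtain ⟨t', ht', rfl⟩ := Option.map_eq_some_iff.mp h2
      have ihstep := pvStep_inv (b :: t) t' ht'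
      show pvRunM (pvStepM st a) (b :: t) = pvRunM st (a :: t')
      rw [ihstep (pvStepM st a)]
      rfl

-- each deletion removes exactly two characters
theorem pvStep_len : ∀ (s s' : List Char), pvStep? s = some s' → s.length = s'.length + 2
  | [], _, h => by simp [pvStep?] at h
  | [_], _, h => by simp [pvStep?] at h
  | a :: b :: t, s', h => by
    by_cases hm : pvIsOpenC a ∧ pvPairOf a = b
    · obtain rfl : t = s' := by simpa [pvStep?, hm] using h
      simp
    · have h2 : (pvStep? (b :: t)).map (a :: ·) = some s' := by simpa [pvStep?, hm] using h
      obtain ⟨t', ht', rfl⟩ := Option.map_eq_some_iff.mp h2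
      have := pvStep_len (b :: t) t' ht'
      simp at this ⊢
      omega

-- deletion only removes characters
theorem pvStep_mem : ∀ (s s' : List Char), pvStep? s = some s' → ∀ c ∈ s', c ∈ s
  | [], _, h => by simp [pvStep?] at h
  | [_], _, h => by simp [pvStep?] at h
  | a :: b :: t, s', h => by
    by_cases hm : pvIsOpenC a ∧ pvPairOf a = b
    · obtain rfl : t = s' := by simpa [pvStep?, hm] using h
      intro c hcmem; simp [hcmem]
    · have h2 : (pvStep? (b :: t)).map (a :: ·) = some s' := by simpa [pvStep?, hm] using h
      obtain ⟨t', ht', rfl⟩ := Option.map_eq_some_iff.mp h2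
      intro c hcmem
      rcases List.mem_cons.mp hcmem with rfl | hcm
      · simp
      · have := pvStep_mem (b :: t) t' ht' c hcm
        simp at this ⊢
        tauto

-- the while-loop preserves the machine's final state …
theorem pvReduce_run : ∀ (n : Nat) (s : List Char) (st : Option (List Char)),
    pvRunM st (pvReduce n s) = pvRunM st s := by
  intro n
  induction n with
  | zero => intro s st; rfl
  | succ m ih =>
    intro s st
    cases hs : pvStep? s with
    | none => simp [pvReduce, hs]
    | some s' =>
      simp only [pvReduce, hs]
      rw [ih s' st, pvStep_inv s s' hs st]

-- … keeps only characters of its input …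
theorem pvReduce_mem : ∀ (n : Nat) (s : List Char), ∀ c ∈ pvReduce n s, c ∈ s := by
  intro n
  induction n with
  | zero => intro s c hc; simpa [pvReduce] using hc
  | succ m ih =>
    intro s c hc
    cases hs : pvStep? s with
    | none => simpa [pvReduce, hs] using hc
    | some s' =>
      simp only [pvReduce, hs] at hc
      exact pvStep_mem s s' hs c (ih s' c hc)

-- … and with fuel = length it reaches an irreducible string
theorem pvReduce_irr : ∀ (n : Nat) (s : List Char), s.length ≤ n → pvStep? (pvReduce n s) = none := by
  intro n
  induction n with
  | zero =>
    intro s hlen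
    have : s = [] := List.eq_nil_of_length_eq_zero (Nat.le_zero.mp hlen)
    subst this; rfl
  | succ m ih =>
    intro s hlen
    cases hs : pvStep? s with
    | none => simp [pvReduce, hs]
    | some s' =>
      have := pvStep_len s s' hs
      simp only [pvReduce, hs]
      exact ih s' (by omega)

-- running the machine over opens only pushes them all
theorem pvOpens_run (s : List Char) : ∀ st : List Char, (∀ c ∈ s, pvIsOpenC c = true) →
    pvRunM (some st) s = some (s.reverse ++ st) := by
  induction s with
  | nil => intro st _; rfl
  | cons c rest ih =>
    intro st hall
    have hc : pvIsOpenC c = true := hall c (by simp)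
    have : pvRunM (some st) (c :: rest) = pvRunM (pvStepM (some st) c) rest := rfl
    rw [this]
    simp only [pvStepM, hc, if_pos]
    rw [ih (c :: st) (fun x hx => hall x (by simp [hx]))]
    simp

-- in an irreducible string, an all-opens prefix never matches the next character
theorem pvNo_adj : ∀ (u : List Char) (c : Char) (v : List Char),
    pvStep? (u ++ c :: v) = none → (∀ x ∈ u, pvIsOpenC x = true) →
    ∀ (h : u ≠ []), ¬ (pvPairOf (u.getLast h) = c)
  | [], c, v, _, _, h => absurd rfl h
  | [x], c, v, hnone, hall, _ => by
    have hx : pvIsOpenC x = true := hall x (by simp)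
    simp only [List.cons_append, List.nil_append, pvStep?] at hnone
    by_cases hm : pvIsOpenC x ∧ pvPairOf x = c
    · simp [hm] at hnone
    · simpa [List.getLast] using fun hpc => hm ⟨hx, hpc⟩
  | x :: y :: u', c, v, hnone, hall, _ => by
    have htail : pvStep? (y :: u' ++ c :: v) = none := by
      simp only [List.cons_append, pvStep?] at hnone
      split at hnone
      · exact absurd hnone (by simp)
      · simpa using hnone
    have ih := pvNo_adj (y :: u') c v (by simpa using htail)
      (fun z hz => hall z (by simp at hz ⊢; tauto)) (by simp)
    simpa [List.getLast] using ih

-- characterization of the machine on an irreducible bracket-only string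
theorem pvIrr_char (s : List Char)
    (hb : ∀ c ∈ s, (pvIsOpenC c || pvIsCloseC c) = true)
    (hirr : pvStep? s = none) :
    pvRunM (some []) s = if s.any pvIsCloseC then none else some s.reverse := by
  have hsplit : s.takeWhile pvIsOpenC ++ s.dropWhile pvIsOpenC = s := List.takeWhile_append_dropWhile
  cases hd : s.dropWhile pvIsOpenC with
  | nil =>
    have hall : ∀ c ∈ s, pvIsOpenC c = true := List.dropWhile_eq_nil_iff.mp hd
    have hnoc : s.any pvIsCloseC = false := by
      rw [List.any_eq_false]
      intro c hc
      simp [pvOpen_not_close c (hall c hc)]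
    rw [hnoc]
    simpa using pvOpens_run s [] hall
  | cons c v =>
    obtain ⟨u, hallu, hseq⟩ : ∃ u, (∀ x ∈ u, pvIsOpenC x = true) ∧ s = u ++ c :: v :=
      ⟨s.takeWhile pvIsOpenC, fun x hx => List.mem_takeWhile_imp hx, by conv_lhs => rw [← hsplit, hd]⟩
    have hcs : c ∈ s := by rw [hseq]; simp
    have hcno : pvIsOpenC c = false := by
      have := List.head?_dropWhile_not pvIsOpenC s
      rw [hd] at this
      simpa using this
    have hcc : pvIsCloseC c = true := by
      have := hb c hcs
      simp [hcno] at this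
      exact this
    have hany : s.any pvIsCloseC = true := List.any_eq_true.mpr ⟨c, hcs, hcc⟩
    have happ : pvRunM (some ([] : List Char)) (u ++ c :: v)
        = pvRunM (pvRunM (some []) u) (c :: v) := by
      simp [pvRunM, List.foldl_append]
    have hgoal : pvRunM (some []) s = none := by
      rw [hseq, happ, pvOpens_run u [] hallu]
      cases u with
      | nil =>
        have hstep : pvRunM (some (([] : List Char).reverse ++ [])) (c :: v) = pvRunM none v := by
          simp [pvRunM, List.foldl, pvStepM, hcno, hcc]
        rw [hstep]; exact pvRunM_none v
      | cons y u' =>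
        have hune : (y :: u') ≠ [] := by simp
        have hnomatch : ¬ (pvPairOf ((y :: u').getLast hune) = c) :=
          pvNo_adj (y :: u') c v (by rw [← hseq]; exact hirr) hallu hune
        have hrev : (y :: u').reverse ++ [] = (y :: u').getLast hune :: (y :: u').dropLast.reverse := by
          conv_lhs => rw [← List.dropLast_append_getLast hune]
          simp
        rw [hrev]
        have hstep : pvRunM (some ((y :: u').getLast hune :: (y :: u').dropLast.reverse)) (c :: v)
            = pvRunM none v := by
          simp [pvRunM, List.foldl, pvStepM, hcno, hcc, hnomatch]
        rw [hstep]; exact pvRunM_none v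
    simp [hany, hgoal]

-- the two per-line computations agree
theorem pvPerLine (cs : List Char) :
    (let p := pvLoopA [] cs
     let s := cs.filter (fun c => pvIsOpenC c || pvIsCloseC c)
     let r := pvReduce s.length s
     (if p.2 then none else some p.1.reverse) =
       (if r.any pvIsCloseC then none else some r.reverse)) := by
  simp only
  set s := cs.filter (fun c => pvIsOpenC c || pvIsCloseC c) with hs
  set r := pvReduce s.length s with hr
  have h1 : pvRunM (some []) cs = (if (pvLoopA [] cs).2 then none else some (pvLoopA [] cs).1.reverse) := by
    simpa using pvBridgeA cs []
  have h2 : pvRunM (some []) cs = pvRunM (some []) s := pvFilter_run cs _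
  have h3 : pvRunM (some []) r = pvRunM (some []) s := pvReduce_run s.length s _
  have hbr : ∀ c ∈ r, (pvIsOpenC c || pvIsCloseC c) = true := by
    intro c hc
    rw [hr] at hc
    have hmem : c ∈ s := pvReduce_mem s.length s c hc
    rw [hs] at hmem
    exact (List.mem_filter.mp hmem).2
  have hirr : pvStep? r = none := pvReduce_irr s.length s le_rfl
  have h4 := pvIrr_char r hbr hirr
  rw [← h1, h2, ← h3, h4]

-- ===== VERDICT (by name: the statement is the Claim_ definition above) =====
theorem filter_to_incomplete_leftover_spec : Claim_equal_filter_to_incomplete_leftover := by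
  intro lines _
  unfold Spec_filter_to_incomplete_leftover filter_to_incomplete_leftover filter_to_incomplete_leftover_alt
  have hfun : ∀ (output : List (List String)) (line : String),
      (let p := pvLoopA [] line.toList
       if p.2 = false ∧ p.1 ≠ [] then output ++ [p.1.map (fun c => String.ofList [c])] else output) =
      (let s := line.toList.filter (fun c => pvIsOpenC c || pvIsCloseC c)
       let r := pvReduce s.length s
       if r ≠ [] ∧ r.any pvIsCloseC = false then output ++ [r.map (fun c => String.ofList [c])] else output) := by
    intro output line
    have h := pvPerLine line.toList
    simp only at h ⊢
    set p := pvLoopA [] line.toList with hp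
    set s := line.toList.filter (fun c => pvIsOpenC c || pvIsCloseC c) with hs
    set r := pvReduce s.length s with hr
    by_cases hcor : p.2 = true
    · rw [if_pos hcor] at h
      have hany : r.any pvIsCloseC = true := by
        cases hra : r.any pvIsCloseC with
        | true => rfl
        | false => rw [if_neg (by simp [hra])] at h; simp at h
      simp [hcor, hany]
    · have hcor' : p.2 = false := by simpa using hcor
      rw [if_neg (by simp [hcor'])] at h
      have hany : r.any pvIsCloseC = false := by
        cases hra : r.any pvIsCloseC with
        | false => rfl
        | true => rw [if_pos (by simp [hra])] at h; simp at h
      rw [if_neg (by simp [hany])] at h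
      have hpr : p.1 = r := List.reverse_injective (Option.some.inj h)
      by_cases hne : r = []
      · simp [hcor', hne, hpr]
      · simp [hcor', hany, hne, hpr]
  have : (fun (output : List (List String)) (line : String) =>
      (let p := pvLoopA [] line.toList
       if p.2 = false ∧ p.1 ≠ [] then output ++ [p.1.map (fun c => String.ofList [c])] else output)) =
      (fun (output : List (List String)) (line : String) =>
      (let s := line.toList.filter (fun c => pvIsOpenC c || pvIsCloseC c)
       let r := pvReduce s.length s
       if r ≠ [] ∧ r.any pvIsCloseC = false then output ++ [r.map (fun c => String.ofList [c])] else output)) :=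
    funext fun o => funext fun l => hfun o l
  rw [this]
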